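-- pv_equiv track=rewrite | github.com/danielcg69/Equipo3 | src/utils1.py | cambia_espacios
-- ===== SOURCE A (Python) =====
-- def cambia_espacios(cadena):
--     cadAux = ""
--
--     for i in range(len(cadena)):
--        if cadena[i] == " ":
--             cadAux += "-"
--        else:
--             cadAux += cadena[i]
--
--     return cadAux
-- ===== SOURCE B (Python) =====
-- def cambia_espacios(cadena):
--     # Tokenize on the single-space delimiter, then join tokens with "-".
--     # split(" ") keeps empty tokens for leading/trailing/consecutive spaces,
--     # so this is exact.
--     return "-".join(cadena.split(" "))
-- ===== Notes on version B (the rewrite author's own statement) =====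
-- stated objective: idiomatic
-- what changed: Replaces the index-by-index character scan with per-character branching and repeated string concatenation by a tokenize-then-join two-pass: split the string on the single-space delimiter and join the tokens with the dash separator.
import Mathlib
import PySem

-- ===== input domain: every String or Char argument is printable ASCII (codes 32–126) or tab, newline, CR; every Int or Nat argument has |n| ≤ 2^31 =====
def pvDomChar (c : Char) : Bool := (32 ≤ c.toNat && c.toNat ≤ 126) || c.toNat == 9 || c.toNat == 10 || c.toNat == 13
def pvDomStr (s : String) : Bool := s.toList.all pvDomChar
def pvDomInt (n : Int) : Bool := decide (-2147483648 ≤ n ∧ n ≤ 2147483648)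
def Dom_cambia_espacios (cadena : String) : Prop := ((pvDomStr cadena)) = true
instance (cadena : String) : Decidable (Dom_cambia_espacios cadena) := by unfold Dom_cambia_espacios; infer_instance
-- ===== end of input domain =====

-- B replaces A's per-character scan-and-append with split-on-" " then join-with-"-" (idiomatic two-pass).

-- ===== PORT A =====
-- A scans the string left to right, appending '-' for each space and the character otherwise.
def cambia_espacios (cadena : String) : String :=
  String.ofList
    (cadena.toList.foldl (fun (cadAux : List Char) c =>
      if c == ' ' then cadAux ++ ['-'] else cadAux ++ [c]) [])

-- ===== PORT B =====
-- Source B: return "-".join(cadena.split(" ")).  sep = " " ≠ "", so split? is always some;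
-- .getD [] only makes the lookup total.
def cambia_espacios_alt (cadena : String) : String :=
  PySem.Str.join "-" ((PySem.Str.split? cadena " ").getD [])

-- ===== PRECONDITION & SPEC =====
def Spec_cambia_espacios (cadena : String) (out : String) : Prop := out = cambia_espacios_alt cadena
instance (cadena : String) (out : String) : Decidable (Spec_cambia_espacios cadena out) := by unfold Spec_cambia_espacios; infer_instance

-- ===== CLAIM (what is proved, stated in full; the proofs are below) =====
def Claim_equal_cambia_espacios : Prop := ∀ (cadena : String), Dom_cambia_espacios cadena → Spec_cambia_espacios cadena (cambia_espacios cadena)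

-- ===== LEMMAS AND PROOFS =====

-- the character map A applies
def pvDash (c : Char) : Char := if c == ' ' then '-' else c

theorem pv_foldl_map (cs : List Char) (acc : List Char) :
    cs.foldl (fun (cadAux : List Char) c =>
      if c == ' ' then cadAux ++ ['-'] else cadAux ++ [c]) acc
      = acc ++ cs.map pvDash := by
  induction cs generalizing acc with
  | nil => simp
  | cons c rest ih =>
      rw [List.foldl_cons, ih]
      by_cases h : c = ' ' <;> simp [pvDash, h]

theorem pv_go_ne_nil (sep : List Char) (fuel : Nat) (l cur : List Char)
    (acc : List (List Char)) : PySem.Chars.splitOn.go sep fuel l cur acc ≠ [] := by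
  induction fuel generalizing l cur acc with
  | zero => simp [PySem.Chars.splitOn.go]
  | succ fuel ih =>
      cases l with
      | nil => simp [PySem.Chars.splitOn.go]
      | cons c rest =>
          simp only [PySem.Chars.splitOn.go]
          split
          · exact ih _ _ _
          · exact ih _ _ _

theorem pv_go_acc (sep : List Char) (fuel : Nat) (l cur : List Char)
    (acc : List (List Char)) :
    PySem.Chars.splitOn.go sep fuel l cur acc
      = acc.reverse ++ PySem.Chars.splitOn.go sep fuel l cur [] := by
  induction fuel generalizing l cur acc with
  | zero => simp [PySem.Chars.splitOn.go]
  | succ fuel ih =>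
      cases l with
      | nil => simp [PySem.Chars.splitOn.go]
      | cons c rest =>
          simp only [PySem.Chars.splitOn.go]
          split
          · rw [ih _ _ (cur.reverse :: acc), ih _ _ [cur.reverse]]
            simp
          · rw [ih rest (c :: cur) acc]

theorem pv_join_go (l : List Char) (fuel : Nat) (cur : List Char)
    (h : l.length < fuel) :
    PySem.Chars.join ['-'] (PySem.Chars.splitOn.go [' '] fuel l cur [])
      = cur.reverse ++ l.map pvDash := by
  induction l generalizing fuel cur with
  | nil =>
      cases fuel with
      | zero => omega
      | succ fuel => simp [PySem.Chars.splitOn.go, PySem.Chars.join_singleton]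
  | cons c rest ih =>
      cases fuel with
      | zero => omega
      | succ fuel =>
          simp only [PySem.Chars.splitOn.go]
          by_cases hc : c = ' '
          · have hpre : [' '].isPrefixOf (c :: rest) = true := by
              simp [List.isPrefixOf, hc]
            simp only [hpre, if_pos]
            rw [show List.drop [' '].length (c :: rest) = rest by simp]
            have hlen : rest.length < fuel := by
              simpa using Nat.lt_of_succ_lt_succ h
            have := pv_go_acc [' '] fuel rest [] [cur.reverse]
            rw [show PySem.Chars.splitOn.go [' '] fuel rest [] [cur.reverse]
                  = [cur.reverse] ++ PySem.Chars.splitOn.go [' '] fuel rest [] [] from this]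
            obtain ⟨p, ps, hps⟩ :
                ∃ p ps, PySem.Chars.splitOn.go [' '] fuel rest [] [] = p :: ps := by
              cases hgo : PySem.Chars.splitOn.go [' '] fuel rest [] [] with
              | nil => exact absurd hgo (pv_go_ne_nil _ _ _ _ _)
              | cons p ps => exact ⟨p, ps, rfl⟩
            rw [hps]
            rw [show [cur.reverse] ++ p :: ps = cur.reverse :: p :: ps from rfl]
            rw [PySem.Chars.join_cons_cons]
            rw [← hps, ih fuel [] hlen]
            simp [pvDash, hc]
          · have hbc : (' ' == c) = false := by simp [Ne.symm hc]
            have hpre : [' '].isPrefixOf (c :: rest) = false := by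
              simp [List.isPrefixOf, hbc]
            simp only [hpre]
            rw [if_neg (by simp)]
            have hlen : rest.length < fuel := by
              simpa using Nat.lt_of_succ_lt_succ h
            rw [ih fuel (c :: cur) hlen]
            simp [pvDash, hc]

theorem pv_join_splitOn (cs : List Char) :
    PySem.Chars.join ['-'] (PySem.Chars.splitOn cs [' ']) = cs.map pvDash := by
  have := pv_join_go cs (cs.length + 1) [] (by omega)
  simpa [PySem.Chars.splitOn] using this

-- ===== VERDICT (by name: the statement is the Claim_ definition above) =====
theorem cambia_espacios_spec : Claim_equal_cambia_espacios := by
  intro cadena _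
  unfold Spec_cambia_espacios cambia_espacios cambia_espacios_alt
  rw [pv_foldl_map]
  have hsplit : (PySem.Str.split? cadena " ").getD []
      = (PySem.Chars.splitOn cadena.toList [' ']).map String.ofList := by
    simp [PySem.Str.split?, PySem.Chars.split?,
      show (" " : String).toList = [' '] from rfl]
  rw [hsplit]
  simp only [PySem.Str.join, List.map_map]
  have hmap : (PySem.Chars.splitOn cadena.toList [' ']).map
      (String.toList ∘ String.ofList) = PySem.Chars.splitOn cadena.toList [' '] := by
    simp [Function.comp_def]
  rw [show ("-" : String).toList = ['-'] from rfl, hmap, pv_join_splitOn,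
    List.nil_append]
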